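-- pv_equiv track=rewrite | github.com/StephenJBrasel/Void-Scribe | ServerSide/Algorithm/Package/void_scribe/void_scribe/MarkovGen.py | createNGRAMList
-- ===== SOURCE A (Python) =====
-- def createNGRAMList(strings = ["hello", "world"], order = 3):
--     """
--     Returns starters, ngrams:
--
--     starters = list of len(order) ngrams from the start of each string in strings.
--
--     ngrams = dictionary with keys of ngrams and values of following individual characters.
--
--     """
--     ngrams = {}
--     starts, ends = [], []
--     for string in strings:
--         for i in range(len(string) - order + 1):
--             gram = string[i:(i + order)]
--             if i == 0:
--                 if gram not in starts:
--                     starts.append(gram)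
--             elif i == (len(string) - order):
--                 if gram not in ends:
--                     ends.append(gram)
--             if i+order < len(string):
--                 if gram not in ngrams.keys():
--                     ngrams[gram] = []
--                 ngrams[gram].append(string[i+order])
--     return starts, ends, ngrams
-- ===== SOURCE B (Python) =====
-- def createNGRAMList(strings = ["hello", "world"], order = 3):
--     starts = []
--     for s in strings:
--         if len(s) >= order:
--             g = s[0:order]
--             if g not in starts:
--                 starts.append(g)
--     ends = []
--     for s in strings:
--         if len(s) > order:
--             g = s[len(s)-order:len(s)]
--             if g not in ends:
--                 ends.append(g)
--     ngrams = {}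
--     for s in strings:
--         for i in range(len(s) - order):
--             g = s[i:i+order]
--             ngrams.setdefault(g, []).append(s[i+order])
--     return starts, ends, ngrams
-- ===== Notes on version B (the rewrite author's own statement) =====
-- stated objective: simpler
-- what changed: Replaces A's single branched indexed loop (one pass with an if/elif ladder and explicit range(len-order+1) bookkeeping) by three independent passes: ordered dedup of s[0:order] starters for len(s) >= order, ordered dedup of s[len(s)-order:] ends for len(s) > order, and a setdefault grouping pass over range(len(s)-order).
import Mathlib
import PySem

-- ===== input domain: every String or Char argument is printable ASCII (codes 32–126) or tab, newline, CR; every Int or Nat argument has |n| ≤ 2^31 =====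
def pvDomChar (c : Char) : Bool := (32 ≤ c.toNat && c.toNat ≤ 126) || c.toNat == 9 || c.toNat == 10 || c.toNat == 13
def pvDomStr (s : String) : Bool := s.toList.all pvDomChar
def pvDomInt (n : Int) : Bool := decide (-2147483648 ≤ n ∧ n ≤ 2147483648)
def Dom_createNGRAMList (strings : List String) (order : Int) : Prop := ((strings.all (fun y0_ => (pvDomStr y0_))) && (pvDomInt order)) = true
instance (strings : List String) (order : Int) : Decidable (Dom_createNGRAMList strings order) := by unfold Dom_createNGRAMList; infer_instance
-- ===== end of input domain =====

-- B replaces A's single branched indexed loop by three independent passes (starters, ends, ngram grouping); objective: simpler.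

-- ===== PORT A =====
-- string[j] as the 1-character string Python returns; "" only where Python would raise IndexError (excluded by Pre_)
def pyCharStr (s : String) (j : Int) : String :=
  ((PySem.Str.pyGet? s j).map (fun c => String.ofList [c])).getD ""

-- A's two dict lines: 'if gram not in ngrams.keys(): ngrams[gram] = []' then 'ngrams[gram].append(string[i+order])'
def ngUpdA (order : Int) (s : String) (ng : PySem.Dict String (List String)) (i : Int) :
    PySem.Dict String (List String) :=
  let gram := PySem.Str.slice s (some i) (some (i + order))
  let ng1 := if ng.contains gram then ng else ng.insert gram []
  ng1.modify gram [] (fun l => l ++ [pyCharStr s (i + order)])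

-- one iteration of A's inner 'for i in range(len(string) - order + 1)' loop
def stepA (order : Int) (s : String)
    (acc : List String × List String × PySem.Dict String (List String)) (i : Int) :
    List String × List String × PySem.Dict String (List String) :=
  let gram := PySem.Str.slice s (some i) (some (i + order))
  let acc1 := if i = 0 then
      (if gram ∈ acc.1 then acc else (acc.1 ++ [gram], acc.2.1, acc.2.2))
    else if i = PySem.Str.len s - order then
      (if gram ∈ acc.2.1 then acc else (acc.1, acc.2.1 ++ [gram], acc.2.2))
    else acc
  if i + order < PySem.Str.len s then
    (acc1.1, acc1.2.1, ngUpdA order s acc1.2.2 i)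
  else acc1

def createNGRAMList (strings : List String) (order : Int) :
    List String × List String × (List (String × List String)) :=
  let r := strings.foldl
    (fun acc s => (PySem.List.pyRange 0 (PySem.Str.len s - order + 1) 1).foldl (stepA order s) acc)
    ([], [], PySem.Dict.empty)
  (r.1, r.2.1, r.2.2.items)

-- ===== PORT B =====
-- pass 1: collect string[0:order] of every string with len(string) >= order, first occurrences only
def startStep (order : Int) (st : List String) (s : String) : List String :=
  if order ≤ PySem.Str.len s then
    let g := PySem.Str.slice s (some 0) (some order)
    if g ∈ st then st else st ++ [g]
  else st

-- pass 2: collect string[len(string)-order:len(string)] of every string with len(string) > order (strict)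
def endStep (order : Int) (en : List String) (s : String) : List String :=
  if order < PySem.Str.len s then
    let g := PySem.Str.slice s (some (PySem.Str.len s - order)) (some (PySem.Str.len s))
    if g ∈ en then en else en ++ [g]
  else en

-- 'ngrams.setdefault(g, []).append(s[i+order])'
def ngUpdB (order : Int) (s : String) (ng : PySem.Dict String (List String)) (i : Int) :
    PySem.Dict String (List String) :=
  let g := PySem.Str.slice s (some i) (some (i + order))
  (ng.setdefault g []).modify g [] (fun l => l ++ [pyCharStr s (i + order)])

-- pass 3: 'for i in range(len(s) - order)' grouping pass of one string
def ngramStep (order : Int) (ng : PySem.Dict String (List String)) (s : String) :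
    PySem.Dict String (List String) :=
  (PySem.List.pyRange 0 (PySem.Str.len s - order) 1).foldl (ngUpdB order s) ng

def createNGRAMList_alt (strings : List String) (order : Int) :
    List String × List String × (List (String × List String)) :=
  let starts := strings.foldl (startStep order) []
  let ends := strings.foldl (endStep order) []
  let ngrams := strings.foldl (ngramStep order) PySem.Dict.empty
  (starts, ends, ngrams.items)

-- ===== PRECONDITION & SPEC =====
-- Pre_ excludes exactly the inputs where Python A raises IndexError (negative order with some string
-- shorter than -order makes string[i+order] hit an index below -len); A returns on everything else.
def Pre_createNGRAMList (strings : List String) (order : Int) : Prop :=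
  0 ≤ order ∨ ∀ s ∈ strings, -(PySem.Str.len s) ≤ order
instance (strings : List String) (order : Int) : Decidable (Pre_createNGRAMList strings order) := by
  unfold Pre_createNGRAMList; infer_instance
def pvWitness_createNGRAMList : List String × Int := (["hello", "world"], 3)

def Spec_createNGRAMList (strings : List String) (order : Int) (out : List String × List String × (List (String × List String))) : Prop := out = createNGRAMList_alt strings order
instance (strings : List String) (order : Int) (out : List String × List String × (List (String × List String))) : Decidable (Spec_createNGRAMList strings order out) := by unfold Spec_createNGRAMList; infer_instance

-- ===== CLAIM (what is proved, stated in full; the proofs are below) =====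
def Claim_equal_createNGRAMList : Prop := ∀ (strings : List String) (order : Int), Dom_createNGRAMList strings order → Pre_createNGRAMList strings order → Spec_createNGRAMList strings order (createNGRAMList strings order)

-- ===== LEMMAS AND PROOFS =====

-- A's two dict lines are exactly B's setdefault-then-append
lemma ngUpdA_eq_ngUpdB (order : Int) (s : String) (ng : PySem.Dict String (List String)) (i : Int) :
    ngUpdA order s ng i = ngUpdB order s ng i := by
  unfold ngUpdA ngUpdB
  by_cases h : ng.contains (PySem.Str.slice s (some i) (some (i + order))) = true
  · simp only [if_pos h, PySem.Dict.setdefault_of_contains _ _ h]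
  · simp only [if_neg h, PySem.Dict.setdefault_of_not_contains _ _ (Bool.eq_false_iff.mpr h)]

-- middle of A's inner loop (indices 1 <= k <= n, n := len s - order): only the ends branch at i = n
-- and the ngram updates at i < n fire
lemma middleA (order : Int) (s : String) :
    ∀ (m : Nat) (k : Int) (st en : List String) (ng : PySem.Dict String (List String)),
      k = PySem.Str.len s - order - m → 1 ≤ k →
      (PySem.List.pyRange k (PySem.Str.len s - order + 1) 1).foldl (stepA order s) (st, en, ng)
        = (st,
           (let g := PySem.Str.slice s (some (PySem.Str.len s - order)) (some (PySem.Str.len s));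
            if g ∈ en then en else en ++ [g]),
           (PySem.List.pyRange k (PySem.Str.len s - order) 1).foldl (ngUpdB order s) ng) := by
  intro m
  induction m with
  | zero =>
    intro k st en ng hk h1
    have hkn : k = PySem.Str.len s - order := by omega
    subst hkn
    rw [PySem.List.pyRange_one_singleton, PySem.List.pyRange_one_eq_nil (le_refl _)]
    simp only [List.foldl_cons, List.foldl_nil]
    unfold stepA
    have hsl : PySem.Str.len s - order + order = PySem.Str.len s := by omega
    simp only [hsl]
    split_ifs <;> first | rfl | omega
  | succ m ih =>
    intro k st en ng hk h1
    have hkn : k < PySem.Str.len s - order := by omega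
    rw [PySem.List.pyRange_one_cons (by omega : k < PySem.Str.len s - order + 1)]
    simp only [List.foldl_cons]
    have hstep : stepA order s (st, en, ng) k = (st, en, ngUpdB order s ng k) := by
      unfold stepA
      simp only [ngUpdA_eq_ngUpdB]
      split_ifs <;> first | rfl | omega
    rw [hstep, ih (k + 1) st en (ngUpdB order s ng k) (by omega) (by omega),
        PySem.List.pyRange_one_cons hkn]
    simp only [List.foldl_cons]

-- A's whole inner loop over one string equals B's three per-string steps
lemma inner_eq (order : Int) (s : String) (st en : List String)
    (ng : PySem.Dict String (List String)) :
    (PySem.List.pyRange 0 (PySem.Str.len s - order + 1) 1).foldl (stepA order s) (st, en, ng)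
      = (startStep order st s, endStep order en s, ngramStep order ng s) := by
  unfold startStep endStep ngramStep
  rcases lt_trichotomy (PySem.Str.len s - order) 0 with hneg | hzero | hpos
  · rw [PySem.List.pyRange_one_eq_nil (by omega : PySem.Str.len s - order + 1 ≤ 0),
        PySem.List.pyRange_one_eq_nil (by omega : PySem.Str.len s - order ≤ 0)]
    simp only [List.foldl_nil]
    split_ifs <;> first | rfl | omega
  · rw [(by omega : PySem.Str.len s - order + 1 = 0 + 1), PySem.List.pyRange_one_singleton,
        PySem.List.pyRange_one_eq_nil (by omega : PySem.Str.len s - order ≤ 0)]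
    simp only [List.foldl_cons, List.foldl_nil]
    unfold stepA
    simp only [zero_add]
    split_ifs <;> first | rfl | omega
  · rw [PySem.List.pyRange_one_cons (by omega : (0 : Int) < PySem.Str.len s - order + 1),
        PySem.List.pyRange_one_cons hpos]
    simp only [List.foldl_cons, zero_add]
    have hstep : stepA order s (st, en, ng) 0
        = ((if PySem.Str.slice s (some 0) (some order) ∈ st then st
            else st ++ [PySem.Str.slice s (some 0) (some order)]), en, ngUpdB order s ng 0) := by
      unfold stepA
      simp only [ngUpdA_eq_ngUpdB, zero_add]
      split_ifs <;> first | rfl | omega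
    rw [hstep, middleA order s (PySem.Str.len s - order - 1).toNat 1 _ en (ngUpdB order s ng 0)
          (by omega) (by omega)]
    have h1 : order ≤ PySem.Str.len s := by omega
    have h2 : order < PySem.Str.len s := by omega
    simp only [if_pos h1, if_pos h2]

-- the outer loop over strings distributes into B's three passes
lemma outer_eq (order : Int) (ls : List String) (st en : List String)
    (ng : PySem.Dict String (List String)) :
    ls.foldl (fun acc s =>
        (PySem.List.pyRange 0 (PySem.Str.len s - order + 1) 1).foldl (stepA order s) acc)
        (st, en, ng)
      = (ls.foldl (startStep order) st, ls.foldl (endStep order) en,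
         ls.foldl (ngramStep order) ng) := by
  induction ls generalizing st en ng with
  | nil => rfl
  | cons s rest ih => simp only [List.foldl_cons, inner_eq, ih]

-- ===== VERDICT (by name: the statement is the Claim_ definition above) =====
theorem createNGRAMList_spec : Claim_equal_createNGRAMList := by
  intro strings order _ _
  unfold Spec_createNGRAMList createNGRAMList createNGRAMList_alt
  rw [outer_eq]
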